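-- pv_equiv track=rewrite | github.com/mohamad1014/AutoScout24 | check_row.py | check_year
-- ===== SOURCE A (Python) =====
-- def check_year(start=None, end=None, specific=None, registration=None):
--     if start:
--         if end:
--             if [True for x in range(start, end+1) if str(x) in registration]:
--                 return True
--         else:
--             if [True for x in range(start, 2023) if str(x) in registration]:
--                 return True
--     if end and not start:
--         if [True for x in range(1940, end + 1) if str(x) in registration]:
--             return True
--     if str(specific) in registration:
--         return True
--     return False
-- ===== SOURCE B (Python) =====
-- def _canon(s):
--     # value of s if s is the canonical decimal form str(v) of some int v, else None
--     neg = s.startswith('-')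
--     body = s[1:] if neg else s
--     if not body.isdigit():
--         return None
--     if len(body) > 1 and body[0] == '0':
--         return None
--     v = 0
--     for c in body:
--         v = v * 10 + (ord(c) - 48)
--     if neg and v == 0:
--         return None
--     return -v if neg else v
--
--
-- def _range_hit(lo, hi, registration):
--     # does str(x) occur in registration for some lo <= x <= hi?
--     # scan registration once: any such occurrence is a canonical decimal
--     # substring of at most max(len(str(lo)), len(str(hi))) characters
--     cap = max(len(str(lo)), len(str(hi)))
--     n = len(registration)
--     for i in range(n):
--         for j in range(i + 1, min(i + cap, n) + 1):
--             v = _canon(registration[i:j])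
--             if v is not None and lo <= v <= hi:
--                 return True
--     return False
--
--
-- def check_year(start=None, end=None, specific=None, registration=None):
--     hit = False
--     if start:
--         if end:
--             hit = _range_hit(start, end, registration)
--         else:
--             hit = _range_hit(start, 2022, registration)
--     elif end:
--         hit = _range_hit(1940, end, registration)
--     if hit:
--         return True
--     return str(specific) in registration
-- ===== Notes on version B (the rewrite author's own statement) =====
-- stated objective: alternative
-- what changed: Instead of testing 'str(x) in registration' for every year x in the range, B scans the registration string once for substrings that are the canonical decimal form of an integer (at most max(len(str(lo)), len(str(hi))) characters long) and checks whether any such value lies in the range; B's cost is independent of the range size (A times out on huge ranges), though A's C-level substring test is faster on long strings with small ranges.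
import Mathlib
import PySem

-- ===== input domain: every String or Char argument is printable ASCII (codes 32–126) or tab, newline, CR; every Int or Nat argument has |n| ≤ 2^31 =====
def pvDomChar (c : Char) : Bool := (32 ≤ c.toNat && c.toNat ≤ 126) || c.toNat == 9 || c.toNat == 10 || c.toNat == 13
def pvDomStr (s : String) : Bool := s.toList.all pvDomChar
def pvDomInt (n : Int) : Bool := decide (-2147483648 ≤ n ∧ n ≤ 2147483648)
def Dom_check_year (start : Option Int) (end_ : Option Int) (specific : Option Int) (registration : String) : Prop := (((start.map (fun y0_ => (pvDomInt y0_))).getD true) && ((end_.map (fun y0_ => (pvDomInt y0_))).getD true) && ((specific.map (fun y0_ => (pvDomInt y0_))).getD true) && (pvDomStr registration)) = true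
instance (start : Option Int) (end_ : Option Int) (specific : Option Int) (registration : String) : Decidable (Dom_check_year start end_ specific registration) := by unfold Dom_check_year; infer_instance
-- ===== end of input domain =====

-- B replaces A's scan of the whole year range (one substring test per year) by a single scan of the
-- registration string for canonical decimal substrings whose value lies in the range, so B's cost is
-- independent of the range size (objective: alternative algorithm).

-- ===== PORT A =====

-- Python truthiness of an Optional[int]: None and 0 are falsy ('if start:')
def pyTruthy (o : Option Int) : Bool :=
  match o with
  | none => false
  | some v => v != 0

-- str(o) for o an Optional[int]: str(None) = "None"
def pyOptStr (o : Option Int) : String :=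
  match o with
  | none => "None"
  | some v => PySem.Int.toStr v

-- '[True for x in range(lo, hiE) if str(x) in registration]' tested for non-emptiness
def aRangeHit (lo hiE : Int) (registration : String) : Bool :=
  !(((PySem.List.pyRange lo hiE 1).filter
      (fun x => PySem.Str.isIn (PySem.Int.toStr x) registration)).map (fun _ => true)).isEmpty

def check_year (start : Option Int) (end_ : Option Int) (specific : Option Int) (registration : String) : Bool :=
  -- if start: if end: range(start, end+1) else: range(start, 2023)
  let b1 : Bool :=
    if pyTruthy start then
      if pyTruthy end_ then aRangeHit (start.getD 0) ((end_.getD 0) + 1) registration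
      else aRangeHit (start.getD 0) 2023 registration
    else false
  -- if end and not start: range(1940, end+1)
  let b2 : Bool :=
    if pyTruthy end_ && !(pyTruthy start) then aRangeHit 1940 ((end_.getD 0) + 1) registration
    else false
  if b1 then true
  else if b2 then true
  else if PySem.Str.isIn (pyOptStr specific) registration then true
  else false

-- ===== PORT B =====

-- _canon(s): the value v if s is the canonical decimal form str(v) of some int, else None.
-- s.startswith('-') is ported as head? = '-' ; body.isdigit() (Python: nonempty, all ASCII digits)
-- as ¬isEmpty && all isdigit — exact on the stated ASCII domain.
def canonParse (s : List Char) : Option Int :=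
  let neg : Bool := s.head? == some '-'
  let body := if neg then s.tail else s
  if !body.isEmpty && body.all PySem.Chars.isdigit then
    if decide (1 < body.length) && (body.head? == some '0') then none
    else
      let v : Int := body.foldl (fun a c => a * 10 + ((c.toNat : Int) - 48)) 0
      if neg && (v == 0) then none
      else some (if neg then -v else v)
  else none

-- _range_hit(lo, hi, registration): one scan over registration; a candidate substring is at most
-- cap = max(len(str(lo)), len(str(hi))) characters long; early-returning loops become .any
def bRangeHit (lo hi : Int) (registration : String) : Bool :=
  let cs := registration.toList
  let cap : Int := ((max (PySem.Int.toChars lo).length (PySem.Int.toChars hi).length : Nat) : Int)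
  let n : Int := (cs.length : Int)
  (PySem.List.pyRange 0 n 1).any (fun i =>
    (PySem.List.pyRange (i + 1) (min (i + cap) n + 1) 1).any (fun j =>
      match canonParse (PySem.List.slice cs (some i) (some j)) with
      | none => false
      | some v => decide (lo ≤ v) && decide (v ≤ hi)))

def check_year_alt (start : Option Int) (end_ : Option Int) (specific : Option Int) (registration : String) : Bool :=
  let hit : Bool :=
    if pyTruthy start then
      if pyTruthy end_ then bRangeHit (start.getD 0) (end_.getD 0) registration
      else bRangeHit (start.getD 0) 2022 registration
    else if pyTruthy end_ then bRangeHit 1940 (end_.getD 0) registration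
    else false
  if hit then true
  else PySem.Str.isIn (pyOptStr specific) registration

-- ===== PRECONDITION & SPEC =====
def Spec_check_year (start : Option Int) (end_ : Option Int) (specific : Option Int) (registration : String) (out : Bool) : Prop := out = check_year_alt start end_ specific registration
instance (start : Option Int) (end_ : Option Int) (specific : Option Int) (registration : String) (out : Bool) : Decidable (Spec_check_year start end_ specific registration out) := by unfold Spec_check_year; infer_instance

-- ===== CLAIM (what is proved, stated in full; the proofs are below) =====
def Claim_equal_check_year : Prop := ∀ (start : Option Int) (end_ : Option Int) (specific : Option Int) (registration : String), Dom_check_year start end_ specific registration → Spec_check_year start end_ specific registration (check_year start end_ specific registration)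

-- ===== LEMMAS AND PROOFS =====

def myRender (n : Nat) : List Char :=
  if n < 10 then [Nat.digitChar n]
  else myRender (n / 10) ++ [Nat.digitChar (n % 10)]
decreasing_by exact Nat.div_lt_self (by omega) (by norm_num)

lemma myRender_lt {n : Nat} (h : n < 10) : myRender n = [Nat.digitChar n] := by
  rw [myRender]; simp [h]

lemma myRender_ge {n : Nat} (h : 10 ≤ n) :
    myRender n = myRender (n / 10) ++ [Nat.digitChar (n % 10)] := by
  rw [myRender, if_neg (Nat.not_lt.2 h)]

lemma toDigitsCore_eq (f : Nat) : ∀ (n : Nat) (acc : List Char), n < f →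
    Nat.toDigitsCore 10 f n acc = myRender n ++ acc := by
  induction f with
  | zero => intro n acc h; omega
  | succ f ih =>
    intro n acc h
    rw [Nat.toDigitsCore]
    by_cases h10 : n < 10
    · have hz : n / 10 = 0 := Nat.div_eq_of_lt h10
      simp only [hz]
      rw [myRender_lt h10, Nat.mod_eq_of_lt h10]
      rfl
    · have hge : 10 ≤ n := Nat.not_lt.1 h10
      have hz : ¬ (n / 10 = 0) := by
        have : 1 ≤ n / 10 := (Nat.one_le_div_iff (by norm_num)).2 hge
        omega
      simp only [if_neg hz]
      rw [ih (n / 10) _ (by omega), myRender_ge hge, List.append_assoc]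
      rfl

lemma toChars_eq (v : Int) :
    PySem.Int.toChars v = if v < 0 then '-' :: myRender v.natAbs else myRender v.toNat := by
  unfold PySem.Int.toChars Nat.toDigits
  by_cases h : v < 0
  · rw [if_pos h, if_pos h, toDigitsCore_eq _ _ _ (by omega), List.append_nil]
  · rw [if_neg h, if_neg h, toDigitsCore_eq _ _ _ (by omega), List.append_nil]

def intVal (l : List Char) : Int := l.foldl (fun a c => a * 10 + ((c.toNat : Int) - 48)) 0

lemma digitChar_isdigit {d : Nat} (h : d < 10) : PySem.Chars.isdigit (Nat.digitChar d) = true := by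
  interval_cases d <;> decide

lemma digitChar_toNat {d : Nat} (h : d < 10) : (Nat.digitChar d).toNat = d + 48 := by
  interval_cases d <;> decide

lemma isdigit_bounds {c : Char} (h : PySem.Chars.isdigit c = true) :
    48 ≤ c.toNat ∧ c.toNat ≤ 57 := by
  simp only [PySem.Chars.isdigit, Bool.and_eq_true, decide_eq_true_eq] at h
  exact ⟨h.1, h.2⟩

lemma digitChar_of_isdigit {c : Char} (h : PySem.Chars.isdigit c = true) :
    Nat.digitChar (c.toNat - 48) = c := by
  obtain ⟨h1, h2⟩ := isdigit_bounds h
  apply Char.ext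
  apply UInt32.toNat_inj.1
  show (Nat.digitChar (c.toNat - 48)).toNat = c.toNat
  rw [digitChar_toNat (by omega)]
  omega

lemma myRender_ne_nil (n : Nat) : myRender n ≠ [] := by
  by_cases h : n < 10
  · rw [myRender_lt h]; simp
  · rw [myRender_ge (by omega)]; simp

lemma myRender_all_digit (n : Nat) : (myRender n).all PySem.Chars.isdigit = true := by
  induction n using Nat.strong_induction_on with
  | _ n ih =>
    by_cases h : n < 10
    · rw [myRender_lt h]; simp [digitChar_isdigit h]
    · rw [myRender_ge (by omega)]
      simp only [List.all_append]
      rw [ih (n / 10) (Nat.div_lt_self (by omega) (by norm_num))]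
      simp [digitChar_isdigit (Nat.mod_lt n (by norm_num))]

lemma myRender_zero : myRender 0 = ['0'] := by
  rw [myRender_lt (by norm_num)]; rfl

lemma myRender_head_ne_zero {n : Nat} (h : n ≠ 0) : (myRender n).head? ≠ some '0' := by
  induction n using Nat.strong_induction_on with
  | _ n ih =>
    by_cases h10 : n < 10
    · rw [myRender_lt h10]
      simp only [List.head?_cons, ne_eq, Option.some.injEq]
      intro hc
      have := digitChar_toNat h10
      rw [hc] at this
      simp at this
      omega
    · rw [myRender_ge (by omega)]
      rw [List.head?_append_of_ne_nil _ (myRender_ne_nil _)]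
      exact ih (n / 10) (Nat.div_lt_self (by omega) (by norm_num)) (by omega)

lemma intVal_append_singleton (xs : List Char) (c : Char) :
    intVal (xs ++ [c]) = intVal xs * 10 + ((c.toNat : Int) - 48) := by
  simp [intVal]

lemma intVal_myRender (n : Nat) : intVal (myRender n) = (n : Int) := by
  induction n using Nat.strong_induction_on with
  | _ n ih =>
    by_cases h : n < 10
    · rw [myRender_lt h]
      simp [intVal, digitChar_toNat h]
    · rw [myRender_ge (by omega), intVal_append_singleton,
        ih (n / 10) (Nat.div_lt_self (by omega) (by norm_num)),
        digitChar_toNat (Nat.mod_lt n (by norm_num))]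
      push_cast
      omega

lemma myRender_len_mono {a b : Nat} (h : a ≤ b) :
    (myRender a).length ≤ (myRender b).length := by
  induction b using Nat.strong_induction_on generalizing a with
  | _ b ih =>
    by_cases hb : b < 10
    · rw [myRender_lt hb, myRender_lt (show a < 10 by omega)]; simp
    · rw [myRender_ge (show 10 ≤ b by omega)]
      by_cases ha : a < 10
      · rw [myRender_lt ha]
        simp only [List.length_append, List.length_cons, List.length_nil]
        have := List.length_pos_of_ne_nil (myRender_ne_nil (b / 10))
        omega
      · rw [myRender_ge (by omega)]
        simp only [List.length_append, List.length_cons, List.length_nil]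
        have := ih (b / 10) (Nat.div_lt_self (by omega) (by norm_num)) (Nat.div_le_div_right h)
        omega


lemma canon_unique (ds : List Char) (hne : ds ≠ [])
    (hdig : ds.all PySem.Chars.isdigit = true)
    (hlead : ds.length = 1 ∨ ds.head? ≠ some '0') :
    ∃ m : Nat, intVal ds = (m : Int) ∧ ds = myRender m := by
  induction ds using List.reverseRecOn with
  | nil => exact absurd rfl hne
  | append_singleton xs c ih =>
    rw [List.all_append] at hdig
    simp only [Bool.and_eq_true, List.all_cons, List.all_nil, Bool.and_true] at hdig
    obtain ⟨hxs, hc⟩ := hdig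
    obtain ⟨hc1, hc2⟩ := isdigit_bounds hc
    by_cases hxnil : xs = []
    · subst hxnil
      refine ⟨c.toNat - 48, ?_, ?_⟩
      · simp [intVal]; omega
      · rw [myRender_lt (by omega), digitChar_of_isdigit hc]; rfl
    · have hlen : 2 ≤ (xs ++ [c]).length := by
        have := List.length_pos_of_ne_nil hxnil
        simp only [List.length_append, List.length_cons, List.length_nil]
        omega
      have hlead' : (xs ++ [c]).head? ≠ some '0' := by
        rcases hlead with h1 | h2
        · omega
        · exact h2
      have hheadxs : xs.head? ≠ some '0' := by
        rwa [List.head?_append_of_ne_nil _ hxnil] at hlead'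
      obtain ⟨m₀, hv, hr⟩ := ih hxnil hxs (Or.inr hheadxs)
      have hm₀ : 1 ≤ m₀ := by
        rcases Nat.eq_zero_or_pos m₀ with h0 | h1
        · subst h0
          rw [myRender_zero] at hr
          subst hr
          simp at hheadxs
        · exact h1
      refine ⟨m₀ * 10 + (c.toNat - 48), ?_, ?_⟩
      · rw [intVal_append_singleton, hv]
        push_cast
        omega
      · have hdiv : (m₀ * 10 + (c.toNat - 48)) / 10 = m₀ := by omega
        have hmod : (m₀ * 10 + (c.toNat - 48)) % 10 = c.toNat - 48 := by omega
        rw [myRender_ge (by omega), hdiv, hmod, digitChar_of_isdigit hc, hr]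

lemma foldl_eq_intVal (l : List Char) :
    l.foldl (fun a c => a * 10 + ((c.toNat : Int) - 48)) 0 = intVal l := rfl

lemma isdigit_ne_dash {c : Char} (h : PySem.Chars.isdigit c = true) : c ≠ '-' := by
  rintro rfl
  simp [PySem.Chars.isdigit] at h

lemma lead_ok {body : List Char} (hne : body ≠ [])
    (h2 : ¬ (decide (1 < body.length) && (body.head? == some '0')) = true) :
    body.length = 1 ∨ body.head? ≠ some '0' := by
  simp only [Bool.and_eq_true, decide_eq_true_eq, beq_iff_eq, not_and] at h2
  by_cases hl : 1 < body.length
  · exact Or.inr (h2 hl)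
  · have := List.length_pos_of_ne_nil hne
    omega

lemma canonParse_eq_some_iff (s : List Char) (v : Int) :
    canonParse s = some v ↔ s = PySem.Int.toChars v := by
  constructor
  · intro h
    by_cases hneg : s.head? = some '-'
    · obtain ⟨t, rfl⟩ : ∃ t, s = '-' :: t := by
        cases s with
        | nil => simp at hneg
        | cons a t => simp only [List.head?_cons, Option.some.injEq] at hneg; exact ⟨t, by rw [hneg]⟩
      simp only [canonParse, List.head?_cons, beq_self_eq_true, if_true, List.tail_cons] at h
      split_ifs at h with h1 h2 h3 <;> simp only [reduceCtorEq, Option.some.injEq] at h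
      simp only [Bool.and_eq_true, Bool.not_eq_true', List.isEmpty_eq_false_iff] at h1
      obtain ⟨hne, hdig⟩ := h1
      obtain ⟨m, hv, hr⟩ := canon_unique t hne hdig (lead_ok hne h2)
      rw [foldl_eq_intVal, hv] at h h3
      simp only [Bool.and_eq_true, beq_iff_eq] at h3
      have hm : m ≠ 0 := by
        intro h0; exact h3 ⟨by trivial, by rw [h0]; rfl⟩
      rw [toChars_eq, if_pos (by omega : v < 0)]
      have : v.natAbs = m := by omega
      rw [this, ← hr]
    · have hnegf : (s.head? == some '-') = false := by
        simpa using hneg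
      simp only [canonParse, hnegf, Bool.false_eq_true, if_false, Bool.false_and] at h
      split_ifs at h with h1 h2 <;> simp only [reduceCtorEq, Option.some.injEq] at h
      simp only [Bool.and_eq_true, Bool.not_eq_true', List.isEmpty_eq_false_iff] at h1
      obtain ⟨hne, hdig⟩ := h1
      obtain ⟨m, hv, hr⟩ := canon_unique s hne hdig (lead_ok hne h2)
      rw [foldl_eq_intVal, hv] at h
      have hm : (m : Int) = v := h
      rw [toChars_eq, if_neg (by omega : ¬ v < 0)]
      have : v.toNat = m := by omega
      rw [this, ← hr]
  · intro h
    subst h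
    rw [toChars_eq]
    by_cases hv : v < 0
    · rw [if_pos hv]
      have hm : 1 ≤ v.natAbs := by omega
      have hne := myRender_ne_nil v.natAbs
      have hdig := myRender_all_digit v.natAbs
      have hlead := myRender_head_ne_zero (show v.natAbs ≠ 0 by omega)
      simp only [canonParse, List.head?_cons, beq_self_eq_true, if_true, List.tail_cons]
      rw [if_pos, if_neg, if_neg]
      · rw [foldl_eq_intVal, intVal_myRender]
        congr 1
        omega
      · rw [foldl_eq_intVal, intVal_myRender]
        simp only [Bool.and_eq_true, beq_iff_eq]
        rintro ⟨-, h0⟩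
        have : (v.natAbs : Int) = 0 := by exact_mod_cast h0
        omega
      · simp only [Bool.and_eq_true, beq_iff_eq, decide_eq_true_eq]
        rintro ⟨-, h0⟩
        exact hlead h0
      · simp only [Bool.and_eq_true, Bool.not_eq_true', List.isEmpty_eq_false_iff]
        exact ⟨hne, hdig⟩
    · rw [if_neg hv]
      have hne := myRender_ne_nil v.toNat
      have hdig := myRender_all_digit v.toNat
      have hnegf : ((myRender v.toNat).head? == some '-') = false := by
        cases hh : (myRender v.toNat).head? with
        | none => rfl
        | some c =>
          have hcmem : c ∈ myRender v.toNat := by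
            cases hmr : myRender v.toNat with
            | nil => exact absurd hmr hne
            | cons a t => rw [hmr] at hh; simp at hh; subst hh; simp [hmr]
          have : PySem.Chars.isdigit c = true := by
            rw [List.all_eq_true] at hdig
            exact hdig c hcmem
          simpa using isdigit_ne_dash this
      simp only [canonParse, hnegf, Bool.false_eq_true, if_false, Bool.false_and]
      rw [if_pos, if_neg]
      · rw [foldl_eq_intVal, intVal_myRender]
        congr 1
        omega
      · simp only [Bool.and_eq_true, beq_iff_eq, decide_eq_true_eq]
        rintro ⟨hl, h0⟩
        have hnz : v.toNat ≠ 0 := by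
          intro h0'
          rw [h0', myRender_zero] at hl
          simp at hl
        exact myRender_head_ne_zero hnz h0
      · simp only [Bool.and_eq_true, Bool.not_eq_true', List.isEmpty_eq_false_iff]
        exact ⟨hne, hdig⟩

lemma toChars_len_le {lo hi v : Int} (h1 : lo ≤ v) (h2 : v ≤ hi) :
    (PySem.Int.toChars v).length ≤
      max (PySem.Int.toChars lo).length (PySem.Int.toChars hi).length := by
  rw [toChars_eq, toChars_eq lo, toChars_eq hi]
  by_cases hv : v < 0
  · have hlo : lo < 0 := by omega
    rw [if_pos hv, if_pos hlo]
    have := myRender_len_mono (show v.natAbs ≤ lo.natAbs by omega)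
    simp only [List.length_cons]
    omega
  · have hhi : ¬ hi < 0 := by omega
    rw [if_neg hv, if_neg hhi]
    have := myRender_len_mono (show v.toNat ≤ hi.toNat by omega)
    omega

lemma toChars_ne_nil (v : Int) : PySem.Int.toChars v ≠ [] := by
  rw [toChars_eq]
  split_ifs
  · simp
  · exact myRender_ne_nil _

lemma aRangeHit_iff (lo hiE : Int) (reg : String) :
    aRangeHit lo hiE reg = true ↔
      ∃ x : Int, lo ≤ x ∧ x < hiE ∧ PySem.Int.toChars x <:+: reg.toList := by
  unfold aRangeHit
  rw [Bool.not_eq_eq_eq_not, Bool.not_true, List.isEmpty_eq_false_iff, ← List.isEmpty_eq_false_iff,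
    List.isEmpty_map, List.isEmpty_eq_false_iff, ne_eq, List.filter_eq_nil_iff]
  push_neg
  constructor
  · rintro ⟨x, hx, hp⟩
    rw [PySem.List.mem_pyRange_one] at hx
    rw [PySem.Str.isIn_iff_infix, PySem.Int.toList_toStr] at hp
    exact ⟨x, hx.1, hx.2, hp⟩
  · rintro ⟨x, h1, h2, h3⟩
    refine ⟨x, PySem.List.mem_pyRange_one.2 ⟨h1, h2⟩, ?_⟩
    rw [PySem.Str.isIn_iff_infix, PySem.Int.toList_toStr]
    exact h3

lemma slice_infix (cs : List Char) (i j : Int) (hi : 0 ≤ i) (hj : 0 ≤ j) :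
    PySem.List.slice cs (some i) (some j) <:+: cs := by
  rw [PySem.List.slice_toNat (ha := hi) (hb := hj)]
  exact ((cs.drop i.toNat).take_prefix _).isInfix.trans (cs.drop_suffix i.toNat).isInfix

lemma bRangeHit_iff (lo hi : Int) (reg : String) :
    bRangeHit lo hi reg = true ↔
      ∃ x : Int, lo ≤ x ∧ x ≤ hi ∧ PySem.Int.toChars x <:+: reg.toList := by
  unfold bRangeHit
  simp only [List.any_eq_true, PySem.List.mem_pyRange_one]
  constructor
  · rintro ⟨i, ⟨hi0, hin⟩, j, ⟨hji, hjm⟩, hmatch⟩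
    cases hcp : canonParse (PySem.List.slice reg.toList (some i) (some j)) with
    | none => rw [hcp] at hmatch; simp at hmatch
    | some v =>
      rw [hcp] at hmatch
      simp only [Bool.and_eq_true, decide_eq_true_eq] at hmatch
      refine ⟨v, hmatch.1, hmatch.2, ?_⟩
      rw [← (canonParse_eq_some_iff _ _).1 hcp]
      exact slice_infix _ _ _ hi0 (by omega)
  · rintro ⟨x, h1, h2, h3⟩
    obtain ⟨t, u, hcat⟩ := h3
    set sub := PySem.Int.toChars x with hsub
    have hsubne : sub ≠ [] := toChars_ne_nil x
    have hsublen : 1 ≤ sub.length := List.length_pos_of_ne_nil hsubne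
    have hcap : sub.length ≤ max (PySem.Int.toChars lo).length (PySem.Int.toChars hi).length :=
      toChars_len_le h1 h2
    have hlen : reg.toList.length = t.length + sub.length + u.length := by
      rw [← hcat]; simp; omega
    refine ⟨(t.length : Int), ⟨by positivity, by exact_mod_cast by omega⟩,
      (t.length : Int) + (sub.length : Int), ⟨by omega, ?_⟩, ?_⟩
    · have : (t.length : Int) + (sub.length : Int) ≤ (reg.toList.length : Int) := by
        push_cast; omega
      have hc : (t.length : Int) + (sub.length : Int) ≤ (t.length : Int) +
          ((max (PySem.Int.toChars lo).length (PySem.Int.toChars hi).length : Nat) : Int) := by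
        push_cast; omega
      omega
    · have hslice : PySem.List.slice reg.toList (some (t.length : Int))
          (some ((t.length : Int) + (sub.length : Int))) = sub := by
        rw [PySem.List.slice_natCast_add, ← hcat, List.append_assoc, List.drop_left, List.take_left]
      rw [hslice, (canonParse_eq_some_iff sub x).2 hsub]
      simp [h1, h2]


lemma pyTruthy_some_ne {v : Int} (h : v ≠ 0) : pyTruthy (some v) = true := by
  simp [pyTruthy, h]

lemma pyTruthy_some_zero : pyTruthy (some 0) = false := rfl

lemma pyTruthy_none : pyTruthy none = false := rfl

lemma hit_eq (lo hi : Int) (reg : String) :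
    aRangeHit lo (hi + 1) reg = bRangeHit lo hi reg := by
  rw [Bool.eq_iff_iff, aRangeHit_iff, bRangeHit_iff]
  constructor
  · rintro ⟨x, h1, h2, h3⟩; exact ⟨x, h1, by omega, h3⟩
  · rintro ⟨x, h1, h2, h3⟩; exact ⟨x, h1, by omega, h3⟩

lemma hit_eq_2023 (lo : Int) (reg : String) :
    aRangeHit lo 2023 reg = bRangeHit lo 2022 reg := by
  rw [show (2023 : Int) = 2022 + 1 by norm_num]
  exact hit_eq lo 2022 reg

-- ===== VERDICT (by name: the statement is the Claim_ definition above) =====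
theorem check_year_spec : Claim_equal_check_year := by
  intro start end_ specific registration _
  unfold Spec_check_year check_year check_year_alt
  cases start with
  | none =>
    cases end_ with
    | none => simp [pyTruthy_none]
    | some e =>
      by_cases he : e = 0
      · subst he; simp [pyTruthy_none, pyTruthy_some_zero]
      · rw [pyTruthy_none, pyTruthy_some_ne he]
        simp only [Option.getD_some, if_false, if_true, Bool.true_and, Bool.not_false]
        rw [hit_eq 1940 e registration]
        cases bRangeHit 1940 e registration <;> simp
  | some s =>
    by_cases hs : s = 0
    · subst hs
      cases end_ with
      | none => simp [pyTruthy_none, pyTruthy_some_zero]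
      | some e =>
        by_cases he : e = 0
        · subst he; simp [pyTruthy_some_zero]
        · rw [pyTruthy_some_zero, pyTruthy_some_ne he]
          simp only [Option.getD_some, if_false, if_true, Bool.true_and, Bool.not_false]
          rw [hit_eq 1940 e registration]
          cases bRangeHit 1940 e registration <;> simp
    · cases end_ with
      | none =>
        rw [pyTruthy_some_ne hs, pyTruthy_none]
        simp only [Option.getD_some, if_true, if_false, Bool.false_and, Bool.not_true, Bool.and_false]
        rw [hit_eq_2023 s registration]
        cases bRangeHit s 2022 registration <;> simp
      | some e =>
        by_cases he : e = 0
        · subst he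
          rw [pyTruthy_some_ne hs, pyTruthy_some_zero]
          simp only [Option.getD_some, if_true, if_false, Bool.false_and, Bool.not_true, Bool.and_false]
          rw [hit_eq_2023 s registration]
          cases bRangeHit s 2022 registration <;> simp
        · rw [pyTruthy_some_ne hs, pyTruthy_some_ne he]
          simp only [Option.getD_some, if_true, Bool.not_true, Bool.and_false]
          rw [hit_eq s e registration]
          cases bRangeHit s e registration <;> simp
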